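-- pv_equiv track=rewrite | github.com/colebenyshek/google-foobar | 01-solution.py | solution
-- ===== SOURCE A (Python) =====
-- def solution(x):
--     # string to list -> chars to unicode -> invert unicode for a...z --> revert to chars --> join
--     message = list(x)
--     for i in range(len(message)):
--         message[i] = ord(message[i])
--         if (message[i] >= 97 and message[i] <= 122):
--             message[i] = (122+97) - message[i]
--         message[i] = chr(message[i])
--     return ''.join(message)
-- ===== SOURCE B (Python) =====
-- _REV = "abcdefghijklmnopqrstuvwxyz"[::-1]
--
-- def solution(x):
--     # divide and conquer: split the string in halves, decode each half
--     # recursively; a single character is decoded by indexing the reversed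
--     # alphabet (correct because the cipher is an involution applied per char).
--     if len(x) == 0:
--         return x
--     if len(x) == 1:
--         o = ord(x)
--         return _REV[o - 97] if 97 <= o <= 122 else x
--     mid = len(x) // 2
--     return solution(x[:mid]) + solution(x[mid:])
-- ===== Notes on version B (the rewrite author's own statement) =====
-- stated objective: alternative
-- what changed: Replaces A's indexed in-place loop with per-character ord/chr arithmetic by a divide-and-conquer recursion that splits the string in halves and decodes a single character by indexing the reversed alphabet string.
import Mathlib
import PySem

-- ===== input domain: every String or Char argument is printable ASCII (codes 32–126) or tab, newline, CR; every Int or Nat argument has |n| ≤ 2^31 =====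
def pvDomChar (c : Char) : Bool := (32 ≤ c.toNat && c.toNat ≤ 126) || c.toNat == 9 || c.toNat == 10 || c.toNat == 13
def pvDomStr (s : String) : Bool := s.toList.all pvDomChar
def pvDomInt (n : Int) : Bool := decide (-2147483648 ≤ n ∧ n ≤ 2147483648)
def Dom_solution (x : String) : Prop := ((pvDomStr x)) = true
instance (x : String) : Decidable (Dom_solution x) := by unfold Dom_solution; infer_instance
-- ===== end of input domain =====

-- B replaces A's indexed in-place loop by a divide-and-conquer recursion on string halves,
-- decoding a single character by indexing the reversed alphabet (alternative; return value only).

-- ===== PORT A =====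
-- message[i] = ord(...); if 97 <= . <= 122: invert; message[i] = chr(...)
def solution (x : String) : String :=
  let message := x.toList
  let message :=
    (PySem.List.pyRange 0 (message.length : Int) 1).foldl
      (fun msg i =>
        let n : Int := ((PySem.List.pyGetD msg i ' ').toNat : Int)
        let n : Int := if 97 ≤ n ∧ n ≤ 122 then (122 + 97) - n else n
        PySem.List.pySetD msg i (Char.ofNat n.toNat))
      message
  String.mk message

-- ===== PORT B =====
-- _REV = "abcdefghijklmnopqrstuvwxyz"[::-1]
def solutionRev : List Char :=
  (PySem.List.slice? "abcdefghijklmnopqrstuvwxyz".toList none none (-1)).getD []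

-- divide and conquer on the character list; x[:mid] / x[mid:] are take/drop
-- (exact: nonneg in-range slice bounds), _REV[o-97] is guarded in range
def solutionAltGo (xs : List Char) : List Char :=
  if xs.length = 0 then xs
  else if xs.length = 1 then
    let o : Int := ((xs.headD ' ').toNat : Int)
    if 97 ≤ o ∧ o ≤ 122 then [PySem.List.pyGetD solutionRev (o - 97) ' '] else xs
  else
    let mid := xs.length / 2
    solutionAltGo (xs.take mid) ++ solutionAltGo (xs.drop mid)
termination_by xs.length
decreasing_by
  · simp; omega
  · simp; omega

def solution_alt (x : String) : String := String.mk (solutionAltGo x.toList)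

-- ===== PRECONDITION & SPEC =====
def Spec_solution (x : String) (out : String) : Prop := out = solution_alt x
instance (x : String) (out : String) : Decidable (Spec_solution x out) := by unfold Spec_solution; infer_instance

-- ===== CLAIM (what is proved, stated in full; the proofs are below) =====
def Claim_equal_solution : Prop := ∀ (x : String), Dom_solution x → Spec_solution x (solution x)

-- ===== LEMMAS AND PROOFS =====

-- the per-character transform both programs compute
def solutionF (c : Char) : Char :=
  if 97 ≤ c.toNat ∧ c.toNat ≤ 122 then Char.ofNat (219 - c.toNat) else c

-- B's reversed-alphabet lookup agrees with the transform on lowercase codes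
lemma rev_lookup_eq (n : Nat) (h1 : 97 ≤ n) (h2 : n ≤ 122) :
    PySem.List.pyGetD solutionRev ((n : Int) - 97) ' ' = Char.ofNat (219 - n) := by
  interval_cases n <;> decide

-- B's divide-and-conquer is the map of the transform
lemma altGo_eq_map (xs : List Char) : solutionAltGo xs = xs.map solutionF := by
  induction hn : xs.length using Nat.strong_induction_on generalizing xs with
  | _ n ih =>
  match xs with
  | [] => simp [solutionAltGo]
  | [c] =>
    rw [solutionAltGo]
    simp only [List.length_cons, List.length_nil, List.map, List.headD]
    rw [if_pos trivial]
    by_cases h : 97 ≤ c.toNat ∧ c.toNat ≤ 122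
    · have h' : 97 ≤ ((c.toNat : Int)) ∧ ((c.toNat : Int)) ≤ 122 := by
        constructor <;> [exact_mod_cast h.1; exact_mod_cast h.2]
      rw [if_pos h', rev_lookup_eq c.toNat h.1 h.2]
      simp [solutionF, h]
    · have h' : ¬ (97 ≤ ((c.toNat : Int)) ∧ ((c.toNat : Int)) ≤ 122) := by
        exact_mod_cast h
      rw [if_neg h']
      simp [solutionF, h]
  | c₁ :: c₂ :: rest =>
    subst hn
    rw [solutionAltGo]
    set xs := c₁ :: c₂ :: rest with hxs
    have hlen : 2 ≤ xs.length := by simp [hxs]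
    rw [if_neg (by omega), if_neg (by omega)]
    show solutionAltGo (List.take (xs.length / 2) xs) ++
        solutionAltGo (List.drop (xs.length / 2) xs) = List.map solutionF xs
    have h1 : (xs.take (xs.length / 2)).length < xs.length := by simp; omega
    have h2 : (xs.drop (xs.length / 2)).length < xs.length := by simp; omega
    rw [ih _ h1 _ rfl, ih _ h2 _ rfl, ← List.map_append, List.take_append_drop]

-- proof-only name for A's loop body per-character action
def solutionFA (c : Char) : Char :=
  let n : Int := ((c.toNat : Int))
  let n : Int := if 97 ≤ n ∧ n ≤ 122 then (122 + 97) - n else n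
  Char.ofNat n.toNat

lemma solutionFA_eq (c : Char) : solutionFA c = solutionF c := by
  by_cases h : 97 ≤ c.toNat ∧ c.toNat ≤ 122
  · have h' : 97 ≤ ((c.toNat : Int)) ∧ ((c.toNat : Int)) ≤ 122 := by
      constructor <;> [exact_mod_cast h.1; exact_mod_cast h.2]
    simp only [solutionFA, solutionF, if_pos h, if_pos h']
    congr 1
    omega
  · have h' : ¬ (97 ≤ ((c.toNat : Int)) ∧ ((c.toNat : Int)) ≤ 122) := by
      exact_mod_cast h
    simp only [solutionFA, solutionF, if_neg h, if_neg h']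
    simp

-- A's indexed in-place loop is the map of the transform
lemma loop_take (f : Char → Char) (xs : List Char) (n : Nat) (hn : n ≤ xs.length) :
    (PySem.List.pyRange 0 (n : Int) 1).foldl
      (fun msg i => PySem.List.pySetD msg i (f (PySem.List.pyGetD msg i ' '))) xs
    = (xs.take n).map f ++ xs.drop n := by
  induction n with
  | zero => simp [PySem.List.pyRange]
  | succ m ih =>
    have hm : m ≤ xs.length := Nat.le_of_succ_le hn
    have hcast : ((m + 1 : Nat) : Int) = (m : Int) + 1 := by push_cast; ring
    rw [hcast, PySem.List.pyRange_one_succ_right (by positivity), List.foldl_append,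
        ih hm]
    have hl1 : (List.map f (List.take m xs)).length = m := by simp [Nat.min_eq_left hm]
    have hl2 : (List.map f (List.take (m + 1) xs)).length = m + 1 := by
      simp [Nat.min_eq_left hn]
    simp only [List.foldl_cons, List.foldl_nil, PySem.List.pyGetD_natCast,
      PySem.List.pySetD_natCast]
    have hget : (List.map f (List.take m xs) ++ List.drop m xs).getD m ' ' = xs.getD m ' ' := by
      simp only [List.getD,
        List.getElem?_append_right
          (show (List.map f (List.take m xs)).length ≤ m from by omega),
        hl1, Nat.sub_self, List.getElem?_drop, Nat.add_zero]
    rw [hget]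
    apply List.ext_getElem (by simp; omega)
    intro i h1 h2
    have hixs : i < xs.length := by
      have := h2; simp at this; omega
    by_cases him : i = m
    · subst him
      rw [List.getElem_set_self]
      rw [List.getElem_append_left (by omega), List.getElem_map, List.getElem_take]
      congr 1
      simp [List.getD, List.getElem?_eq_getElem hixs]
    · rw [List.getElem_set_ne (by omega)]
      by_cases hi : i < m
      · rw [List.getElem_append_left (by omega), List.getElem_append_left (by omega)]
        simp [List.getElem_take]
      · rw [List.getElem_append_right (by omega), List.getElem_append_right (by omega)]
        simp only [hl1, hl2, List.getElem_drop]
        congr 1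
        omega

-- ===== VERDICT (by name: the statement is the Claim_ definition above) =====
theorem solution_spec : Claim_equal_solution := by
  intro x hdom
  unfold Spec_solution solution_alt
  show String.mk
      ((PySem.List.pyRange 0 (x.toList.length : Int) 1).foldl
        (fun msg i => PySem.List.pySetD msg i (solutionFA (PySem.List.pyGetD msg i ' ')))
        x.toList) = _
  rw [loop_take solutionFA x.toList x.toList.length le_rfl]
  simp only [List.take_length, List.drop_length, List.append_nil]
  rw [altGo_eq_map]
  congr 1
  exact List.map_congr_left (fun c _ => solutionFA_eq c)
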